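-- pv_equiv track=rewrite | github.com/julie-berlin/pub-aie7-dynamic-leadgen | backend/app/graphs/supervisors/master_flow_supervisor.py | _identify_conflicts
-- ===== SOURCE A (Python) =====
-- from typing import Dict, Any, List, Optional, Tuple
--
-- def _identify_conflicts(supervisor_decisions: Dict[str, List[Dict[str, Any]]]) -> List[str]:
--     """Identify conflicts between supervisor recommendations."""
--     conflicts = []
--
--     # Get latest decisions from each supervisor
--     latest_decisions = {}
--     for supervisor, decisions in supervisor_decisions.items():
--         if decisions:
--             latest_decisions[supervisor] = decisions[-1]
--
--     # Check for conflicting recommendations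
--     all_recommendations = []
--     for supervisor, decision in latest_decisions.items():
--         recommendations = decision.get('recommendations', [])
--         for rec in recommendations:
--             all_recommendations.append((supervisor, rec))
--
--     # Simple conflict detection (can be enhanced)
--     conflicting_patterns = [
--         ("continue", "complete"),
--         ("ask_more", "finish_now"),
--         ("engage", "disengage")
--     ]
--
--     for pattern1, pattern2 in conflicting_patterns:
--         has_pattern1 = any(pattern1 in rec[1].lower() for rec in all_recommendations)
--         has_pattern2 = any(pattern2 in rec[1].lower() for rec in all_recommendations)
--         if has_pattern1 and has_pattern2:
--             conflicts.append(f"Conflict detected: {pattern1} vs {pattern2}")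
--
--     return conflicts
-- ===== SOURCE B (Python) =====
-- def _identify_conflicts(supervisor_decisions):
--     """Identify conflicts between supervisor recommendations (one-pass presence table)."""
--     tokens = ("continue", "complete", "ask_more", "finish_now", "engage", "disengage")
--     seen = set()
--     for decisions in supervisor_decisions.values():
--         if decisions:
--             for rec in decisions[-1].get('recommendations', []):
--                 low = rec.lower()
--                 for t in tokens:
--                     if t in low:
--                         seen.add(t)
--     return ["Conflict detected: %s vs %s" % (p1, p2)
--             for p1, p2 in (("continue", "complete"),
--                            ("ask_more", "finish_now"),
--                            ("engage", "disengage"))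
--             if p1 in seen and p2 in seen]
-- ===== Notes on version B (the rewrite author's own statement) =====
-- stated objective: alternative
-- what changed: Replaces the six separate any-scans over the (supervisor, rec) pair list (re-lowering each rec per pattern) with a single pass that lowercases each recommendation once and records which of the six conflict tokens occur into a seen-set, then emits the messages by checking the fixed pairs against that set.
import Mathlib
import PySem

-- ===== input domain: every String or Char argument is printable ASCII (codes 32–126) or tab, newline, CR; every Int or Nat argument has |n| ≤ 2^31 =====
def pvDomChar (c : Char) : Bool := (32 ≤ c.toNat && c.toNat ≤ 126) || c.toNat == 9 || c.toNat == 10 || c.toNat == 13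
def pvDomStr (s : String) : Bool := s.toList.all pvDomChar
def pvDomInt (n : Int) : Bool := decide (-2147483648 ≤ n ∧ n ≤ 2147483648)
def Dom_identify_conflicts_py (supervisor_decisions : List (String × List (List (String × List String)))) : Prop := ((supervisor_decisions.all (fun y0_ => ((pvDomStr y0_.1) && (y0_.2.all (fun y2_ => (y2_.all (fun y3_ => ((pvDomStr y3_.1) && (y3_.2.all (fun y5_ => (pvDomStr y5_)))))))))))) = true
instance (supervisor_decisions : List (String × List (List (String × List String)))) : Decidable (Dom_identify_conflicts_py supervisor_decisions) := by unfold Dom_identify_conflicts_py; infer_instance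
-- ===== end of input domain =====

-- B builds a presence set of the six conflict tokens in one pass over the recommendations
-- (each lowercased once) instead of A's six repeated any-scans; objective: alternative decomposition.

-- ===== PORT A =====
def identify_conflicts_py (supervisor_decisions : List (String × List (List (String × List String)))) : List String :=
  -- latest_decisions: supervisor -> decisions[-1] for non-empty decision lists
  let latest_decisions : List (String × List (String × List String)) :=
    supervisor_decisions.foldl
      (fun acc p => if p.2 ≠ [] then acc ++ [(p.1, (PySem.List.pyGet? p.2 (-1)).getD [])] else acc) []
  -- all_recommendations: (supervisor, rec) pairs
  let all_recommendations : List (String × String) :=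
    latest_decisions.foldl
      (fun acc p => (PySem.Dict.getD ⟨p.2⟩ "recommendations" []).foldl (fun a r => a ++ [(p.1, r)]) acc) []
  let conflicting_patterns : List (String × String) :=
    [("continue", "complete"), ("ask_more", "finish_now"), ("engage", "disengage")]
  conflicting_patterns.foldl
    (fun conflicts pq =>
      let has_pattern1 := all_recommendations.any (fun rec => PySem.Str.isIn pq.1 (PySem.Str.lower rec.2))
      let has_pattern2 := all_recommendations.any (fun rec => PySem.Str.isIn pq.2 (PySem.Str.lower rec.2))
      if has_pattern1 && has_pattern2 then
        conflicts ++ ["Conflict detected: " ++ pq.1 ++ " vs " ++ pq.2]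
      else conflicts) []

-- ===== PORT B =====
def pvTokens : List String := ["continue", "complete", "ask_more", "finish_now", "engage", "disengage"]

def identify_conflicts_py_alt (supervisor_decisions : List (String × List (List (String × List String)))) : List String :=
  let seen : PySem.Set String :=
    supervisor_decisions.foldl
      (fun s p =>
        if p.2 ≠ [] then
          (PySem.Dict.getD ⟨(PySem.List.pyGet? p.2 (-1)).getD []⟩ "recommendations" []).foldl
            (fun s2 r =>
              let low := PySem.Str.lower r
              pvTokens.foldl (fun s3 t => if PySem.Str.isIn t low then PySem.Set.add s3 t else s3) s2)
            s
        else s)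
      PySem.Set.empty
  -- list comprehension over the fixed pairs, filtered by the presence set
  ([("continue", "complete"), ("ask_more", "finish_now"), ("engage", "disengage")].filter
      (fun pq => PySem.Set.contains seen pq.1 && PySem.Set.contains seen pq.2)).map
    (fun pq => "Conflict detected: " ++ pq.1 ++ " vs " ++ pq.2)

-- ===== PRECONDITION & SPEC =====
def Spec_identify_conflicts_py (supervisor_decisions : List (String × List (List (String × List String)))) (out : List String) : Prop := out = identify_conflicts_py_alt supervisor_decisions
instance (supervisor_decisions : List (String × List (List (String × List String)))) (out : List String) : Decidable (Spec_identify_conflicts_py supervisor_decisions out) := by unfold Spec_identify_conflicts_py; infer_instance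

-- ===== CLAIM (what is proved, stated in full; the proofs are below) =====
def Claim_equal_identify_conflicts_py : Prop := ∀ (supervisor_decisions : List (String × List (List (String × List String)))), Dom_identify_conflicts_py supervisor_decisions → Spec_identify_conflicts_py supervisor_decisions (identify_conflicts_py supervisor_decisions)

-- ===== LEMMAS AND PROOFS =====

-- the recommendations contributed by one supervisor entry (empty if its decision list is empty)
def pvRecs (p : String × List (List (String × List String))) : List String :=
  if p.2 ≠ [] then PySem.Dict.getD ⟨(PySem.List.pyGet? p.2 (-1)).getD []⟩ "recommendations" [] else []

-- "some recommendation's lowercase contains t" — the common spec both sides are reduced to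
def pvHit (sd : List (String × List (List (String × List String)))) (t : String) : Bool :=
  sd.any (fun p => (pvRecs p).any (fun r => PySem.Str.isIn t (PySem.Str.lower r)))

-- A side: the latest_decisions fold is a filter+map
theorem pv_latest_eq (sd : List (String × List (List (String × List String)))) :
    sd.foldl (fun acc p => if p.2 ≠ [] then acc ++ [(p.1, (PySem.List.pyGet? p.2 (-1)).getD [])] else acc)
      ([] : List (String × List (String × List String)))
      = ((sd.filter (fun p => !p.2.isEmpty)).map (fun p => (p.1, (PySem.List.pyGet? p.2 (-1)).getD []))) := by
  have h1 := PySem.List.foldl_congr_mem sd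
      (fun acc p => if p.2 ≠ [] then acc ++ [(p.1, (PySem.List.pyGet? p.2 (-1)).getD [])] else acc)
      (fun acc p => if (!p.2.isEmpty) = true then acc ++ [(p.1, (PySem.List.pyGet? p.2 (-1)).getD [])] else acc)
      [] (by intro acc x _; by_cases h : x.2 = [] <;> simp [h])
  rw [h1, PySem.List.foldl_append_if, List.nil_append]

-- A side: the all_recommendations fold is a flatMap of maps
theorem pv_allrecs_eq (latest : List (String × List (String × List String))) :
    latest.foldl (fun acc p => (PySem.Dict.getD ⟨p.2⟩ "recommendations" []).foldl (fun a r => a ++ [(p.1, r)]) acc)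
      ([] : List (String × String))
      = latest.flatMap (fun p => (PySem.Dict.getD ⟨p.2⟩ "recommendations" []).map (fun r => (p.1, r))) := by
  have h1 := PySem.List.foldl_congr_mem latest
      (fun acc p => (PySem.Dict.getD ⟨p.2⟩ "recommendations" []).foldl (fun a r => a ++ [(p.1, r)]) acc)
      (fun acc p => acc ++ (PySem.Dict.getD ⟨p.2⟩ "recommendations" []).map (fun r => (p.1, r)))
      [] (by intro acc x _; exact PySem.List.foldl_append_singleton_eq_map _ _ _)
  rw [h1, PySem.List.foldl_append_eq_flatMap, List.nil_append]

-- A side: each any-scan over all_recommendations equals pvHit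
theorem pv_anyA (sd : List (String × List (List (String × List String)))) (t : String) :
    (((sd.foldl (fun acc p => if p.2 ≠ [] then acc ++ [(p.1, (PySem.List.pyGet? p.2 (-1)).getD [])] else acc)
        ([] : List (String × List (String × List String)))).foldl
        (fun acc p => (PySem.Dict.getD ⟨p.2⟩ "recommendations" []).foldl (fun a r => a ++ [(p.1, r)]) acc)
        ([] : List (String × String))).any
      (fun rec => PySem.Str.isIn t (PySem.Str.lower rec.2))) = pvHit sd t := by
  rw [pv_latest_eq, pv_allrecs_eq]
  simp only [List.any_flatMap, List.any_map, List.any_filter, pvHit]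
  apply congrArg
  funext p
  by_cases h : p.2 = [] <;> simp [pvRecs, h, Function.comp_def]

-- B side: membership after the per-recommendation token pass
theorem pv_tokfold_mem (L : List String) (low : String) (s2 : PySem.Set String) (t : String) :
    t ∈ L.foldl (fun s3 t' => if PySem.Str.isIn t' low then PySem.Set.add s3 t' else s3) s2
      ↔ t ∈ s2 ∨ (t ∈ L ∧ PySem.Str.isIn t low) := by
  induction L generalizing s2 with
  | nil => simp
  | cons hd tl ih =>
      by_cases h : PySem.Str.isIn hd low
      · simp only [List.foldl_cons, h, if_pos]
        rw [ih]
        simp only [PySem.Set.mem_add, List.mem_cons]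
        constructor
        · rintro ((hs | rfl) | ⟨htl, hlow⟩)
          · exact Or.inl hs
          · exact Or.inr ⟨Or.inl rfl, h⟩
          · exact Or.inr ⟨Or.inr htl, hlow⟩
        · rintro (hs | ⟨(rfl | htl), hlow⟩)
          · exact Or.inl (Or.inl hs)
          · exact Or.inl (Or.inr rfl)
          · exact Or.inr ⟨htl, hlow⟩
      · simp only [List.foldl_cons, h, if_neg, Bool.false_eq_true, not_false_iff]
        rw [ih]
        simp only [List.mem_cons]
        constructor
        · rintro (hs | ⟨htl, hlow⟩)
          · exact Or.inl hs
          · exact Or.inr ⟨Or.inr htl, hlow⟩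
        · rintro (hs | ⟨(rfl | htl), hlow⟩)
          · exact Or.inl hs
          · exact absurd hlow h
          · exact Or.inr ⟨htl, hlow⟩

-- B side: membership after the fold over one entry's recommendations
theorem pv_recfold_mem (recs : List String) (s2 : PySem.Set String) (t : String) :
    t ∈ recs.foldl
        (fun s2 r =>
          pvTokens.foldl (fun s3 t' => if PySem.Str.isIn t' (PySem.Str.lower r) then PySem.Set.add s3 t' else s3) s2)
        s2
      ↔ t ∈ s2 ∨ (t ∈ pvTokens ∧ recs.any (fun r => PySem.Str.isIn t (PySem.Str.lower r))) := by
  induction recs generalizing s2 with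
  | nil => simp
  | cons hd tl ih =>
      simp only [List.foldl_cons, List.any_cons, Bool.or_eq_true]
      rw [ih, pv_tokfold_mem]
      tauto

-- B side: membership in the seen set
theorem pv_seen_mem (sd : List (String × List (List (String × List String)))) (s : PySem.Set String) (t : String) :
    t ∈ sd.foldl
        (fun s p =>
          if p.2 ≠ [] then
            (PySem.Dict.getD ⟨(PySem.List.pyGet? p.2 (-1)).getD []⟩ "recommendations" []).foldl
              (fun s2 r =>
                pvTokens.foldl (fun s3 t' => if PySem.Str.isIn t' (PySem.Str.lower r) then PySem.Set.add s3 t' else s3) s2)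
              s
          else s)
        s
      ↔ t ∈ s ∨ (t ∈ pvTokens ∧ pvHit sd t) := by
  induction sd generalizing s with
  | nil => simp [pvHit]
  | cons hd tl ih =>
      have hhit : pvHit (hd :: tl) t
          = ((pvRecs hd).any (fun r => PySem.Str.isIn t (PySem.Str.lower r)) || pvHit tl t) := by
        simp [pvHit]
      by_cases h : hd.2 = []
      · simp only [List.foldl_cons, h, ne_eq, not_true_eq_false, if_false]
        rw [ih, hhit]
        have : pvRecs hd = [] := by simp [pvRecs, h]
        simp [this]
      · simp only [List.foldl_cons, ne_eq, h, not_false_iff, if_true]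
        rw [ih, pv_recfold_mem, hhit]
        have : pvRecs hd = PySem.Dict.getD ⟨(PySem.List.pyGet? hd.2 (-1)).getD []⟩ "recommendations" [] := by
          simp [pvRecs, h]
        rw [← this]
        simp only [Bool.or_eq_true]
        tauto

-- B side: contains on the seen set equals pvHit, for the six tokens
theorem pv_contains_seen (sd : List (String × List (List (String × List String)))) (x : String)
    (hx : x ∈ pvTokens) :
    PySem.Set.contains
      (sd.foldl
        (fun s p =>
          if p.2 ≠ [] then
            (PySem.Dict.getD ⟨(PySem.List.pyGet? p.2 (-1)).getD []⟩ "recommendations" []).foldl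
              (fun s2 r =>
                pvTokens.foldl (fun s3 t' => if PySem.Str.isIn t' (PySem.Str.lower r) then PySem.Set.add s3 t' else s3) s2)
              s
          else s)
        PySem.Set.empty) x = pvHit sd x := by
  have hmem := pv_seen_mem sd PySem.Set.empty x
  rw [Bool.eq_iff_iff]
  unfold PySem.Set.contains
  rw [List.contains_iff_mem, hmem]
  simp only [PySem.Set.empty, List.not_mem_nil, false_or]
  constructor
  · rintro ⟨_, hhit⟩; exact hhit
  · intro hh; exact ⟨hx, hh⟩

-- ===== VERDICT (by name: the statement is the Claim_ definition above) =====
theorem identify_conflicts_py_spec : Claim_equal_identify_conflicts_py := by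
  intro sd _
  show identify_conflicts_py sd = identify_conflicts_py_alt sd
  unfold identify_conflicts_py identify_conflicts_py_alt
  simp only []
  rw [PySem.List.foldl_append_if
        (fun pq : String × String =>
          (((sd.foldl (fun acc p => if p.2 ≠ [] then acc ++ [(p.1, (PySem.List.pyGet? p.2 (-1)).getD [])] else acc)
              ([] : List (String × List (String × List String)))).foldl
              (fun acc p => (PySem.Dict.getD ⟨p.2⟩ "recommendations" []).foldl (fun a r => a ++ [(p.1, r)]) acc)
              ([] : List (String × String))).any
            (fun rec => PySem.Str.isIn pq.1 (PySem.Str.lower rec.2)))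
          && (((sd.foldl (fun acc p => if p.2 ≠ [] then acc ++ [(p.1, (PySem.List.pyGet? p.2 (-1)).getD [])] else acc)
              ([] : List (String × List (String × List String)))).foldl
              (fun acc p => (PySem.Dict.getD ⟨p.2⟩ "recommendations" []).foldl (fun a r => a ++ [(p.1, r)]) acc)
              ([] : List (String × String))).any
            (fun rec => PySem.Str.isIn pq.2 (PySem.Str.lower rec.2))))
        (fun pq : String × String => "Conflict detected: " ++ pq.1 ++ " vs " ++ pq.2)]
  rw [List.nil_append]
  congr 1
  apply List.filter_congr
  intro pq hpq
  have h1 : pq.1 ∈ pvTokens := by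
    simp only [List.mem_cons, List.not_mem_nil, or_false] at hpq
    rcases hpq with rfl | rfl | rfl <;> simp [pvTokens]
  have h2 : pq.2 ∈ pvTokens := by
    simp only [List.mem_cons, List.not_mem_nil, or_false] at hpq
    rcases hpq with rfl | rfl | rfl <;> simp [pvTokens]
  rw [pv_anyA sd pq.1, pv_anyA sd pq.2, pv_contains_seen sd pq.1 h1, pv_contains_seen sd pq.2 h2]
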